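-- pv_equiv track=rewrite | github.com/Nechaiter/CSES-DS-and-Algorithms-spring-2025 | Week 3/even.py | count_sublists
-- ===== SOURCE A (Python) =====
-- def count_sublists(numbers):
--
--     count=0
--     previous=0
--     a=0
--     b=0
--
--     for i in range(len(numbers)):
--
--         if numbers[i]%2==0:
--             count+=1
--             if previous>0:
--                 a=i
--                 count+=a-b
--             else:
--                 b=i
--             previous+=1
--         else:
--             previous=0
--     return count
-- ===== SOURCE B (Python) =====
-- def count_sublists(numbers):
--     # segment into maximal runs of evens; each run of length L contributes L*(L+1)//2
--     total = 0
--     run = 0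
--     for x in numbers:
--         if x % 2 == 0:
--             run += 1
--         else:
--             total += run * (run + 1) // 2
--             run = 0
--     return total + run * (run + 1) // 2
-- ===== Notes on version B (the rewrite author's own statement) =====
-- stated objective: simpler
-- what changed: B segments the list into maximal runs of even numbers and sums the closed-form triangular number L*(L+1)//2 per run, replacing A's per-element incremental count with absolute-index bookkeeping (previous/a/b).
import Mathlib
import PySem

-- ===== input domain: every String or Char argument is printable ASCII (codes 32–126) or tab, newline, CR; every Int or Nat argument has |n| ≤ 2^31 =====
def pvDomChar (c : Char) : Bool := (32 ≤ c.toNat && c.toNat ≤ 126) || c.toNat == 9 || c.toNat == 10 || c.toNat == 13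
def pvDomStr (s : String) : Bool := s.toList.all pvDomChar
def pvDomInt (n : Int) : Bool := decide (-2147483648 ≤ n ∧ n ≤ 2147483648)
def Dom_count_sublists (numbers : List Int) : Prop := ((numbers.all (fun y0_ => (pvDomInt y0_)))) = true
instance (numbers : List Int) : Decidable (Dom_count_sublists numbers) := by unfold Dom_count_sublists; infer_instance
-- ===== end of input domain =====

-- B replaces A's per-element incremental counting with run segmentation + triangular closed form (objective: simpler).
-- ===== PORT A =====
-- for-loop over range(len(numbers)) with state (count, previous, a, b), traversed structurally with index i
def pvLoopA : List Int → Int → Int → Int → Int → Int → Int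
  | [], _, count, _, _, _ => count
  | x :: rest, i, count, previous, a, b =>
    if PySem.Int.mod x 2 = 0 then
      if previous > 0 then
        pvLoopA rest (i + 1) (count + 1 + (i - b)) (previous + 1) i b
      else
        pvLoopA rest (i + 1) (count + 1) (previous + 1) a i
    else
      pvLoopA rest (i + 1) count 0 a b

def count_sublists (numbers : List Int) : Int := pvLoopA numbers 0 0 0 0 0

-- ===== PORT B =====
def pvTri (run : Int) : Int := PySem.Int.floordiv (run * (run + 1)) 2

def pvLoopB : List Int → Int → Int → Int
  | [], total, run => total + pvTri run
  | x :: rest, total, run =>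
    if PySem.Int.mod x 2 = 0 then pvLoopB rest total (run + 1)
    else pvLoopB rest (total + pvTri run) 0

def count_sublists_alt (numbers : List Int) : Int := pvLoopB numbers 0 0

-- ===== PRECONDITION & SPEC =====
def Spec_count_sublists (numbers : List Int) (out : Int) : Prop := out = count_sublists_alt numbers
instance (numbers : List Int) (out : Int) : Decidable (Spec_count_sublists numbers out) := by unfold Spec_count_sublists; infer_instance

-- ===== CLAIM (what is proved, stated in full; the proofs are below) =====
def Claim_equal_count_sublists : Prop := ∀ (numbers : List Int), Dom_count_sublists numbers → Spec_count_sublists numbers (count_sublists numbers)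

-- ===== LEMMAS AND PROOFS =====

lemma pvTri_succ (r : Int) (hr : 0 ≤ r) : pvTri (r + 1) = pvTri r + (r + 1) := by
  unfold pvTri
  rw [PySem.Int.floordiv_eq_ediv_of_pos (by omega), PySem.Int.floordiv_eq_ediv_of_pos (by omega)]
  have h2 : (r + 1) * (r + 1 + 1) = r * (r + 1) + (r + 1) * 2 := by ring
  rw [h2, Int.add_mul_ediv_right _ _ (by omega)]

lemma pvTri_zero : pvTri 0 = 0 := by decide

lemma pvLoop_eq (l : List Int) : ∀ (i count previous a b total run : Int),
    previous = run → 0 ≤ run → count = total + pvTri run → (0 < run → b = i - run) →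
    pvLoopA l i count previous a b = pvLoopB l total run := by
  induction l with
  | nil =>
    intro i count previous a b total run hp hr hc hb
    simpa [pvLoopA, pvLoopB] using hc
  | cons x rest ih =>
    intro i count previous a b total run hp hr hc hb
    by_cases hx : PySem.Int.mod x 2 = 0
    · by_cases hpos : previous > 0
      · have hrun : 0 < run := by omega
        have hb' : b = i - run := hb hrun
        simp only [pvLoopA, pvLoopB, hx, if_pos hpos, if_true]
        apply ih
        · omega
        · omega
        · rw [hc, hb', pvTri_succ run hr]; ring
        · intro _; omega
      · have hrun : run = 0 := by omega
        simp only [pvLoopA, pvLoopB, hx, if_neg hpos, if_true]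
        apply ih
        · omega
        · omega
        · rw [hc, hrun, pvTri_succ 0 le_rfl, pvTri_zero]; ring
        · intro _; omega
    · simp only [pvLoopA, pvLoopB, hx, if_false]
      apply ih
      · rfl
      · exact le_rfl
      · rw [pvTri_zero]; omega
      · intro h; omega

-- ===== VERDICT (by name: the statement is the Claim_ definition above) =====
theorem count_sublists_spec : Claim_equal_count_sublists := by
  intro numbers _
  unfold Spec_count_sublists count_sublists count_sublists_alt
  exact pvLoop_eq numbers 0 0 0 0 0 0 0 rfl le_rfl (by simp [pvTri_zero]) (by omega)
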